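-- pv_equiv track=rewrite | github.com/antoniooodev/instagram-copywriter | backend/copywriter.py | select_images_for_schedule
-- ===== SOURCE A (Python) =====
-- from typing import List, Dict, Any, Optional, Tuple
--
-- def select_images_for_schedule(
--     schedule: List[Tuple[str, str, str, bool]],
--     buckets: Dict[str, List[str]],
--     fallback_template: str = "T1_OGGETTO",
--     strict: bool = False,
-- ) -> List[str]:
--     local = {k: v[:] for k, v in buckets.items()}
--
--     def pop_any() -> str:
--         for tid in sorted(local.keys()):
--             if local[tid]:
--                 return local[tid].pop(0)
--         raise RuntimeError("No images available in any bucket.")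
--
--     chosen = []
--     for day_name, template_id, role, cta_enabled in schedule:
--         if template_id in local and local[template_id]:
--             chosen.append(local[template_id].pop(0))
--             continue
--         if strict:
--             raise RuntimeError(f"Missing images for required template bucket: {template_id} (day={day_name})")
--         if fallback_template in local and local[fallback_template]:
--             chosen.append(local[fallback_template].pop(0))
--             continue
--         chosen.append(pop_any())
--     return chosen
-- ===== SOURCE B (Python) =====
-- def select_images_for_schedule(
--     schedule,
--     buckets,
--     fallback_template="T1_OGGETTO",
--     strict=False,
-- ):
--     # O(K log K + M + total): sort keys once, O(1) index-pointer pops, advancing cursor for the any-bucket fallback.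
--     vals = {k: v for k, v in buckets.items()}
--     pos = {}                      # consumed-prefix length per bucket
--     order = sorted(vals)          # sorted once, up front
--     cursor = 0                    # buckets before 'cursor' in 'order' are exhausted forever
--
--     def has(k):
--         return k in vals and pos.get(k, 0) < len(vals[k])
--
--     def take(k):
--         i = pos.get(k, 0)
--         pos[k] = i + 1
--         return vals[k][i]
--
--     chosen = []
--     for day_name, template_id, role, cta_enabled in schedule:
--         if has(template_id):
--             chosen.append(take(template_id))
--         elif strict:
--             raise RuntimeError(f"Missing images for required template bucket: {template_id} (day={day_name})")
--         elif has(fallback_template):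
--             chosen.append(take(fallback_template))
--         else:
--             while cursor < len(order) and not has(order[cursor]):
--                 cursor += 1
--             if cursor == len(order):
--                 raise RuntimeError("No images available in any bucket.")
--             chosen.append(take(order[cursor]))
--     return chosen
-- ===== Notes on version B (the rewrite author's own statement) =====
-- stated objective: faster
-- what changed: B replaces A's per-call re-sorting of the keys inside pop_any, O(len) list.pop(0) shifts and full sorted rescans by one up-front sort of the keys, O(1) per-bucket index-pointer pops, and a monotonically advancing cursor over the sorted keys for the any-bucket fallback.
import Mathlib
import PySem

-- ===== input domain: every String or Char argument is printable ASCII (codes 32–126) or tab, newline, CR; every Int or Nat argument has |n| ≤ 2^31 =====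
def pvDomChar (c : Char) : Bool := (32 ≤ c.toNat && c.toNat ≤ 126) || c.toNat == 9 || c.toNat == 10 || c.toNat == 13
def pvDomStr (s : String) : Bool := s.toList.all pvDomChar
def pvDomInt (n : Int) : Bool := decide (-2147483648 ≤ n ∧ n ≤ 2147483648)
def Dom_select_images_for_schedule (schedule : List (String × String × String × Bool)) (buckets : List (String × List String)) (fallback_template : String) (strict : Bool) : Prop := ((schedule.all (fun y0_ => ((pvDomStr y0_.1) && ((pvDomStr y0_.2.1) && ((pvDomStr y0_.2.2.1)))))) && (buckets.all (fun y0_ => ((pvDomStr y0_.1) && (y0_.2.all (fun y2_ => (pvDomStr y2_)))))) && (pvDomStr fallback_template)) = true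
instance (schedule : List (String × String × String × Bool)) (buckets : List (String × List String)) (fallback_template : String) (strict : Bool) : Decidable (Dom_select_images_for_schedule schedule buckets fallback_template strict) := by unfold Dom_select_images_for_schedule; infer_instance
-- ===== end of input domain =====

-- B sorts the bucket keys once and replaces A's per-call re-sort, O(n) list.pop(0) shifts and full
-- bucket rescans by O(1) index-pointer pops and a monotonically advancing cursor (objective: faster).

-- ===== PORT A =====
-- pop_any: scan the (re-sorted each call) keys, pop the head of the first non-empty bucket.
-- Where the Python raises RuntimeError ("No images available") we return ("", d); Pre_ excludes those inputs.
def pvPopAnyA (d : PySem.Dict String (List String)) : List String → String × PySem.Dict String (List String)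
  | [] => ("", d)
  | tid :: rest =>
    match d.getD tid [] with
    | [] => pvPopAnyA d rest
    | x :: xs => (x, d.insert tid xs)

-- one loop iteration of A; 'template_id in local and local[template_id]' is 'getD _ [] ≠ []',
-- 'local[t].pop(0)' is 'insert t tail'.  The strict 'raise' path appends "" (excluded by Pre_).
def pvStepA (fallback_template : String) (strict : Bool)
    (st : PySem.Dict String (List String) × List String) (e : String × String × String × Bool) :
    PySem.Dict String (List String) × List String :=
  match st.1.getD e.2.1 [] with
  | x :: xs => (st.1.insert e.2.1 xs, st.2 ++ [x])
  | [] =>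
    if strict then (st.1, st.2 ++ [""])
    else
      match st.1.getD fallback_template [] with
      | x :: xs => (st.1.insert fallback_template xs, st.2 ++ [x])
      | [] =>
        let r := pvPopAnyA st.1 (PySem.List.sorted st.1.keys (fun k => k) false)
        (r.2, st.2 ++ [r.1])

def select_images_for_schedule (schedule : List (String × String × String × Bool)) (buckets : List (String × List String)) (fallback_template : String) (strict : Bool) : List String :=
  (schedule.foldl (pvStepA fallback_template strict) (PySem.Dict.ofList buckets, [])).2

-- ===== PORT B =====
-- has(k): k in vals and pos.get(k, 0) < len(vals[k])
def pvHasB (vals : PySem.Dict String (List String)) (pos : PySem.Dict String Nat) (k : String) : Bool :=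
  vals.contains k && decide (pos.getD k 0 < (vals.getD k []).length)

-- take(k): read vals[k][pos.get(k,0)] and bump the pointer
def pvTakeB (vals : PySem.Dict String (List String)) (pos : PySem.Dict String Nat) (k : String) :
    String × PySem.Dict String Nat :=
  ((vals.getD k []).getD (pos.getD k 0) "", pos.insert k (pos.getD k 0 + 1))

-- the 'while cursor < len(order) and not has(order[cursor]): cursor += 1' loop
def pvAdvance (vals : PySem.Dict String (List String)) (pos : PySem.Dict String Nat)
    (order : List String) (c : Nat) : Nat :=
  if h : c < order.length then
    if pvHasB vals pos (order.getD c "") then c else pvAdvance vals pos order (c + 1)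
  else c
termination_by order.length - c
decreasing_by omega

-- one loop iteration of B over state (pos, cursor, chosen); the raise paths append "" (excluded by Pre_)
def pvStepB (vals : PySem.Dict String (List String)) (order : List String)
    (fallback_template : String) (strict : Bool)
    (st : PySem.Dict String Nat × Nat × List String) (e : String × String × String × Bool) :
    PySem.Dict String Nat × Nat × List String :=
  if pvHasB vals st.1 e.2.1 then
    let r := pvTakeB vals st.1 e.2.1
    (r.2, st.2.1, st.2.2 ++ [r.1])
  else if strict then (st.1, st.2.1, st.2.2 ++ [""])
  else if pvHasB vals st.1 fallback_template then
    let r := pvTakeB vals st.1 fallback_template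
    (r.2, st.2.1, st.2.2 ++ [r.1])
  else
    let c := pvAdvance vals st.1 order st.2.1
    if c < order.length then
      let r := pvTakeB vals st.1 (order.getD c "")
      (r.2, c, st.2.2 ++ [r.1])
    else (st.1, c, st.2.2 ++ [""])

def select_images_for_schedule_alt (schedule : List (String × String × String × Bool)) (buckets : List (String × List String)) (fallback_template : String) (strict : Bool) : List String :=
  let vals := PySem.Dict.ofList buckets
  let order := PySem.List.sorted vals.keys (fun k => k) false
  (schedule.foldl (pvStepB vals order fallback_template strict) (PySem.Dict.empty, 0, [])).2.2

-- ===== PRECONDITION & SPEC =====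
-- Pre_ excludes exactly the inputs where Python A raises RuntimeError: with strict, a template
-- requested more often than its bucket holds; without strict, more slots than images in total.
def Pre_select_images_for_schedule (schedule : List (String × String × String × Bool)) (buckets : List (String × List String)) (fallback_template : String) (strict : Bool) : Prop :=
  if strict then
    ∀ e ∈ schedule, schedule.countP (fun e' => e'.2.1 == e.2.1) ≤ ((PySem.Dict.ofList buckets).getD e.2.1 []).length
  else
    schedule.length ≤ (((PySem.Dict.ofList buckets).values).map List.length).sum
instance (schedule : List (String × String × String × Bool)) (buckets : List (String × List String)) (fallback_template : String) (strict : Bool) : Decidable (Pre_select_images_for_schedule schedule buckets fallback_template strict) := by unfold Pre_select_images_for_schedule; infer_instance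

def pvWitness_select_images_for_schedule : (List (String × String × String × Bool)) × (List (String × List String)) × String × Bool :=
  ([("mon", "T1", "post", true), ("tue", "T9", "story", false)], [("T1", ["a.jpg", "b.jpg"])], "T1_OGGETTO", false)

def Spec_select_images_for_schedule (schedule : List (String × String × String × Bool)) (buckets : List (String × List String)) (fallback_template : String) (strict : Bool) (out : List String) : Prop := out = select_images_for_schedule_alt schedule buckets fallback_template strict
instance (schedule : List (String × String × String × Bool)) (buckets : List (String × List String)) (fallback_template : String) (strict : Bool) (out : List String) : Decidable (Spec_select_images_for_schedule schedule buckets fallback_template strict out) := by unfold Spec_select_images_for_schedule; infer_instance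

-- ===== CLAIM (what is proved, stated in full; the proofs are below) =====
def Claim_equal_select_images_for_schedule : Prop := ∀ (schedule : List (String × String × String × Bool)) (buckets : List (String × List String)) (fallback_template : String) (strict : Bool), Dom_select_images_for_schedule schedule buckets fallback_template strict → Pre_select_images_for_schedule schedule buckets fallback_template strict → Spec_select_images_for_schedule schedule buckets fallback_template strict (select_images_for_schedule schedule buckets fallback_template strict)

-- ===== LEMMAS AND PROOFS =====

-- the images of bucket k still unconsumed on B's side
def pvRem (vals : PySem.Dict String (List String)) (pos : PySem.Dict String Nat) (k : String) : List String :=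
  (vals.getD k []).drop (pos.getD k 0)

-- simulation relation between A's state (d) and B's state (pos, c)
def pvRel (vals : PySem.Dict String (List String)) (order : List String)
    (d : PySem.Dict String (List String)) (pos : PySem.Dict String Nat) (c : Nat) : Prop :=
  d.keys = vals.keys ∧ c ≤ order.length ∧
  (∀ k, d.getD k [] = pvRem vals pos k) ∧
  (∀ i, i < c → d.getD (order.getD i "") [] = [])

lemma pvHasB_iff (vals : PySem.Dict String (List String)) (pos : PySem.Dict String Nat) (k : String) :
    pvHasB vals pos k = true ↔ pvRem vals pos k ≠ [] := by
  unfold pvHasB pvRem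
  rw [Bool.and_eq_true, decide_eq_true_iff]
  constructor
  · rintro ⟨-, hlt⟩ hnil
    rw [List.drop_eq_nil_iff] at hnil
    omega
  · intro hne
    have hlt : pos.getD k 0 < (vals.getD k []).length := by
      by_contra hge
      exact hne (List.drop_eq_nil_iff.mpr (by omega))
    refine ⟨?_, hlt⟩
    by_contra hnc
    rw [Bool.not_eq_true] at hnc
    rw [PySem.Dict.getD_of_not_contains vals [] hnc] at hlt
    simp at hlt

lemma pvRem_insert_self (vals : PySem.Dict String (List String)) (pos : PySem.Dict String Nat) (k : String) :
    pvRem vals (pos.insert k (pos.getD k 0 + 1)) k = (pvRem vals pos k).tail := by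
  unfold pvRem
  rw [PySem.Dict.getD_insert_self, List.tail_drop]

lemma pvRem_insert_ne (vals : PySem.Dict String (List String)) (pos : PySem.Dict String Nat)
    (k k' : String) (n : Nat) (h : k' ≠ k) :
    pvRem vals (pos.insert k n) k' = pvRem vals pos k' := by
  unfold pvRem
  rw [PySem.Dict.getD_insert_of_ne pos n 0 h]

lemma pvRem_head (vals : PySem.Dict String (List String)) (pos : PySem.Dict String Nat)
    (k x : String) (xs : List String) (h : pvRem vals pos k = x :: xs) :
    (vals.getD k []).getD (pos.getD k 0) "" = x := by
  have h' : (vals.getD k []).drop (pos.getD k 0) = x :: xs := h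
  have h2 : ((vals.getD k []).drop (pos.getD k 0)).head? = some x := by
    rw [h']; rfl
  rw [List.head?_drop] at h2
  rw [List.getD_eq_getElem?_getD, h2]
  rfl

-- popping a non-empty bucket preserves the simulation relation
lemma pvRel_take (vals : PySem.Dict String (List String)) (order : List String)
    (d : PySem.Dict String (List String)) (pos : PySem.Dict String Nat) (c : Nat)
    (k x : String) (xs : List String)
    (hrel : pvRel vals order d pos c) (hk : d.getD k [] = x :: xs) :
    pvRel vals order (d.insert k xs) (pos.insert k (pos.getD k 0 + 1)) c := by
  obtain ⟨hkeys, hc, hrem, hcur⟩ := hrel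
  have hcont : d.contains k = true := by
    by_contra hnc
    rw [Bool.not_eq_true] at hnc
    rw [PySem.Dict.getD_of_not_contains d [] hnc] at hk
    simp at hk
  refine ⟨(PySem.Dict.keys_insert_of_contains d xs hcont).trans hkeys, hc, ?_, ?_⟩
  · intro k'
    by_cases hkk : k' = k
    · subst hkk
      rw [PySem.Dict.getD_insert_self, pvRem_insert_self, ← hrem k', hk]
      rfl
    · rw [PySem.Dict.getD_insert_of_ne d xs [] hkk, pvRem_insert_ne vals pos k k' _ hkk]
      exact hrem k'
  · intro i hi
    have he := hcur i hi
    have hne : order.getD i "" ≠ k := by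
      intro heq
      rw [heq, hk] at he
      simp at he
    rw [PySem.Dict.getD_insert_of_ne d xs [] hne]
    exact he

lemma pvPopAnyA_drop (d : PySem.Dict String (List String)) (order : List String) (c : Nat)
    (h : ∀ i, i < c → d.getD (order.getD i "") [] = []) :
    pvPopAnyA d order = pvPopAnyA d (order.drop c) := by
  induction c with
  | zero => rfl
  | succ n ih =>
    rw [ih (fun i hi => h i (Nat.lt_succ_of_lt hi))]
    by_cases hn : n < order.length
    · rw [List.drop_eq_getElem_cons hn]
      have he : d.getD order[n] [] = [] := by
        rw [← List.getD_eq_getElem order "" hn]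
        exact h n (Nat.lt_succ_self n)
      simp [pvPopAnyA, he]
    · rw [List.drop_eq_nil_iff.mpr (by omega), List.drop_eq_nil_iff.mpr (by omega)]

lemma pvAdvance_spec (vals : PySem.Dict String (List String)) (pos : PySem.Dict String Nat)
    (order : List String) (c : Nat) (hc : c ≤ order.length) :
    c ≤ pvAdvance vals pos order c ∧ pvAdvance vals pos order c ≤ order.length ∧
    (∀ i, c ≤ i → i < pvAdvance vals pos order c → pvHasB vals pos (order.getD i "") = false) ∧
    (pvAdvance vals pos order c < order.length → pvHasB vals pos (order.getD (pvAdvance vals pos order c) "") = true) := by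
  have key : ∀ (m c : Nat), c ≤ order.length → order.length - c ≤ m →
      c ≤ pvAdvance vals pos order c ∧ pvAdvance vals pos order c ≤ order.length ∧
      (∀ i, c ≤ i → i < pvAdvance vals pos order c → pvHasB vals pos (order.getD i "") = false) ∧
      (pvAdvance vals pos order c < order.length → pvHasB vals pos (order.getD (pvAdvance vals pos order c) "") = true) := by
    intro m
    induction m with
    | zero =>
      intro c hc hm
      have hce : c = order.length := by omega
      rw [pvAdvance, dif_neg (by omega)]
      exact ⟨le_refl c, by omega, fun i h1 h2 => by omega, fun h => by omega⟩
    | succ n ih =>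
      intro c hc hm
      by_cases hlt : c < order.length
      · by_cases hb : pvHasB vals pos (order.getD c "") = true
        · rw [pvAdvance, dif_pos hlt, if_pos hb]
          exact ⟨le_refl c, by omega, fun i h1 h2 => by omega, fun _ => hb⟩
        · have hstep : pvAdvance vals pos order c = pvAdvance vals pos order (c + 1) := by
            rw [pvAdvance, dif_pos hlt, if_neg hb]
          obtain ⟨ih1, ih2, ih3, ih4⟩ := ih (c + 1) (by omega) (by omega)
          rw [hstep]
          refine ⟨by omega, ih2, ?_, ih4⟩
          intro i h1 h2
          rcases Nat.eq_or_lt_of_le h1 with h | h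
          · subst h
            exact Bool.eq_false_iff.mpr hb
          · exact ih3 i h h2
      · rw [pvAdvance, dif_neg hlt]
        exact ⟨le_refl c, hc, fun i h1 h2 => by omega, fun h => absurd h hlt⟩
  exact key (order.length - c) c hc (le_refl _)

lemma pvPopAnyA_eq_advance (d : PySem.Dict String (List String))
    (vals : PySem.Dict String (List String)) (pos : PySem.Dict String Nat) (order : List String)
    (hrel : ∀ k, d.getD k [] = pvRem vals pos k) (c : Nat) :
    pvPopAnyA d (order.drop c) =
      (if pvAdvance vals pos order c < order.length then
        ((d.getD (order.getD (pvAdvance vals pos order c) "") []).headD "",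
         d.insert (order.getD (pvAdvance vals pos order c) "")
           (d.getD (order.getD (pvAdvance vals pos order c) "") []).tail)
      else ("", d)) := by
  have key : ∀ (m c : Nat), order.length - c ≤ m →
      pvPopAnyA d (order.drop c) =
        (if pvAdvance vals pos order c < order.length then
          ((d.getD (order.getD (pvAdvance vals pos order c) "") []).headD "",
           d.insert (order.getD (pvAdvance vals pos order c) "")
             (d.getD (order.getD (pvAdvance vals pos order c) "") []).tail)
        else ("", d)) := by
    intro m
    induction m with
    | zero =>
      intro c hm
      have hge : ¬ c < order.length := by omega
      rw [pvAdvance, dif_neg hge, if_neg hge, List.drop_eq_nil_iff.mpr (by omega)]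
      rfl
    | succ n ih =>
      intro c hm
      by_cases hlt : c < order.length
      · have hgd : order.getD c "" = order[c] := List.getD_eq_getElem order "" hlt
        by_cases hb : pvHasB vals pos (order.getD c "") = true
        · have hadv : pvAdvance vals pos order c = c := by
            rw [pvAdvance, dif_pos hlt, if_pos hb]
          rw [hadv, if_pos hlt]
          have hne : d.getD (order.getD c "") [] ≠ [] := by
            rw [hrel]
            exact (pvHasB_iff vals pos _).mp hb
          rw [hgd] at hne ⊢
          rcases hd : d.getD order[c] [] with _ | ⟨x, xs⟩
          · exact absurd hd hne
          · rw [List.drop_eq_getElem_cons hlt]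
            simp only [pvPopAnyA]
            rw [hd]
            rfl
        · have hadv : pvAdvance vals pos order c = pvAdvance vals pos order (c + 1) := by
            rw [pvAdvance, dif_pos hlt, if_neg hb]
          have hd : d.getD order[c] [] = [] := by
            rw [← hgd, hrel]
            by_contra hne
            exact hb ((pvHasB_iff vals pos _).mpr hne)
          rw [hadv, List.drop_eq_getElem_cons hlt]
          have step : pvPopAnyA d (order[c] :: order.drop (c + 1)) = pvPopAnyA d (order.drop (c + 1)) := by
            simp only [pvPopAnyA]
            rw [hd]
          rw [step]
          exact ih (c + 1) (by omega)
      · rw [pvAdvance, dif_neg hlt, if_neg hlt, List.drop_eq_nil_iff.mpr (by omega)]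
        rfl
  exact key (order.length - c) c (le_refl _)

-- main simulation: the two folds produce the same 'chosen' list from related states
lemma pvFold_eq (vals : PySem.Dict String (List String)) (order : List String)
    (fallback_template : String) (strict : Bool)
    (horder : order = PySem.List.sorted vals.keys (fun k => k) false) :
    ∀ (schedule : List (String × String × String × Bool)) (d : PySem.Dict String (List String))
      (pos : PySem.Dict String Nat) (c : Nat) (ch : List String), pvRel vals order d pos c →
      (schedule.foldl (pvStepA fallback_template strict) (d, ch)).2 =
      (schedule.foldl (pvStepB vals order fallback_template strict) (pos, c, ch)).2.2 := by
  intro schedule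
  induction schedule with
  | nil => intro d pos c ch hrel; rfl
  | cons e rest ih =>
    intro d pos c ch hrel
    obtain ⟨hkeys, hc, hrem, hcur⟩ := hrel
    simp only [List.foldl_cons]
    rcases ht : d.getD e.2.1 [] with _ | ⟨x, xs⟩
    · -- bucket for the requested template is empty or missing
      have hhas : pvHasB vals pos e.2.1 = false := by
        rw [Bool.eq_false_iff]
        intro hh
        have h2 := (pvHasB_iff vals pos e.2.1).mp hh
        rw [← hrem, ht] at h2
        exact h2 rfl
      cases strict
      · -- strict = false: fallback, then pop_any
        rcases hf : d.getD fallback_template [] with _ | ⟨y, ys⟩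
        · -- fallback bucket empty too: pop_any
          have hhasf : pvHasB vals pos fallback_template = false := by
            rw [Bool.eq_false_iff]
            intro hh
            have h2 := (pvHasB_iff vals pos fallback_template).mp hh
            rw [← hrem, hf] at h2
            exact h2 rfl
          have hsorted : PySem.List.sorted d.keys (fun k => k) false = order := by
            rw [hkeys, horder]
          have hpop := pvPopAnyA_drop d order c hcur
          have heq := pvPopAnyA_eq_advance d vals pos order hrem c
          obtain ⟨ha1, ha2, ha3, ha4⟩ := pvAdvance_spec vals pos order c hc
          by_cases hlt : pvAdvance vals pos order c < order.length
          · have hhk : pvHasB vals pos (order.getD (pvAdvance vals pos order c) "") = true := ha4 hlt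
            have hknil : d.getD (order.getD (pvAdvance vals pos order c) "") [] ≠ [] := by
              rw [hrem]
              exact (pvHasB_iff vals pos _).mp hhk
            rcases hdk : d.getD (order.getD (pvAdvance vals pos order c) "") [] with _ | ⟨z, zs⟩
            · exact absurd hdk hknil
            · have hz : (vals.getD (order.getD (pvAdvance vals pos order c) "") []).getD
                  (pos.getD (order.getD (pvAdvance vals pos order c) "") 0) "" = z :=
                pvRem_head vals pos _ z zs (by rw [← hrem, hdk])
              have hstepA : pvStepA fallback_template false (d, ch) e =
                  (d.insert (order.getD (pvAdvance vals pos order c) "") zs, ch ++ [z]) := by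
                simp only [pvStepA, ht, hf, Bool.false_eq_true, if_false]
                rw [hsorted, hpop, heq, if_pos hlt, hdk]
                rfl
              have hstepB : pvStepB vals order fallback_template false (pos, c, ch) e =
                  (pos.insert (order.getD (pvAdvance vals pos order c) "")
                     (pos.getD (order.getD (pvAdvance vals pos order c) "") 0 + 1),
                   pvAdvance vals pos order c, ch ++ [z]) := by
                simp only [pvStepB, hhas, hhasf, Bool.false_eq_true, if_false, pvTakeB]
                rw [if_pos hlt, hz]
              rw [hstepA, hstepB]
              have hrel2 := pvRel_take vals order d pos c _ z zs ⟨hkeys, hc, hrem, hcur⟩ hdk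
              obtain ⟨hkeys2, -, hrem2, -⟩ := hrel2
              refine ih _ _ _ _ ⟨hkeys2, ha2, hrem2, ?_⟩
              intro i hi
              have hdi : d.getD (order.getD i "") [] = [] := by
                by_cases hic : i < c
                · exact hcur i hic
                · have hfalse := ha3 i (by omega) hi
                  rw [hrem]
                  by_contra hne
                  rw [(pvHasB_iff vals pos _).mpr hne] at hfalse
                  exact Bool.noConfusion hfalse
              have hne : order.getD i "" ≠ order.getD (pvAdvance vals pos order c) "" := by
                intro heq'
                rw [heq', hdk] at hdi
                simp at hdi
              rw [PySem.Dict.getD_insert_of_ne d zs [] hne]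
              exact hdi
          · -- all buckets empty: Python raises; both ports append ""
            have hstepA : pvStepA fallback_template false (d, ch) e = (d, ch ++ [""]) := by
              simp only [pvStepA, ht, hf, Bool.false_eq_true, if_false]
              rw [hsorted, hpop, heq, if_neg hlt]
            have hstepB : pvStepB vals order fallback_template false (pos, c, ch) e =
                (pos, pvAdvance vals pos order c, ch ++ [""]) := by
              simp only [pvStepB, hhas, hhasf, Bool.false_eq_true, if_false]
              rw [if_neg hlt]
            rw [hstepA, hstepB]
            refine ih _ _ _ _ ⟨hkeys, ha2, hrem, ?_⟩
            intro i hi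
            by_cases hic : i < c
            · exact hcur i hic
            · have hfalse := ha3 i (by omega) hi
              rw [hrem]
              by_contra hne
              rw [(pvHasB_iff vals pos _).mpr hne] at hfalse
              exact Bool.noConfusion hfalse
        · -- fallback bucket non-empty
          have hhasf : pvHasB vals pos fallback_template = true :=
            (pvHasB_iff vals pos fallback_template).mpr (by rw [← hrem, hf]; simp)
          have hy : (vals.getD fallback_template []).getD (pos.getD fallback_template 0) "" = y :=
            pvRem_head vals pos fallback_template y ys (by rw [← hrem, hf])
          have hstepA : pvStepA fallback_template false (d, ch) e =
              (d.insert fallback_template ys, ch ++ [y]) := by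
            simp only [pvStepA, ht, hf, Bool.false_eq_true, if_false]
          have hstepB : pvStepB vals order fallback_template false (pos, c, ch) e =
              (pos.insert fallback_template (pos.getD fallback_template 0 + 1), c, ch ++ [y]) := by
            simp only [pvStepB, hhas, hhasf, Bool.false_eq_true, if_false, if_true, pvTakeB]
            rw [hy]
          rw [hstepA, hstepB]
          exact ih _ _ _ _ (pvRel_take vals order d pos c _ y ys ⟨hkeys, hc, hrem, hcur⟩ hf)
      · -- strict = true: Python raises; both ports append ""
        have hstepA : pvStepA fallback_template true (d, ch) e = (d, ch ++ [""]) := by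
          simp only [pvStepA, ht, if_true]
        have hstepB : pvStepB vals order fallback_template true (pos, c, ch) e =
            (pos, c, ch ++ [""]) := by
          simp only [pvStepB, hhas, Bool.false_eq_true, if_false, if_true]
        rw [hstepA, hstepB]
        exact ih _ _ _ _ ⟨hkeys, hc, hrem, hcur⟩
    · -- direct hit
      have hhas : pvHasB vals pos e.2.1 = true :=
        (pvHasB_iff vals pos e.2.1).mpr (by rw [← hrem, ht]; simp)
      have hx : (vals.getD e.2.1 []).getD (pos.getD e.2.1 0) "" = x :=
        pvRem_head vals pos e.2.1 x xs (by rw [← hrem, ht])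
      have hstepA : pvStepA fallback_template strict (d, ch) e = (d.insert e.2.1 xs, ch ++ [x]) := by
        simp only [pvStepA, ht]
      have hstepB : pvStepB vals order fallback_template strict (pos, c, ch) e =
          (pos.insert e.2.1 (pos.getD e.2.1 0 + 1), c, ch ++ [x]) := by
        simp only [pvStepB, hhas, if_true, pvTakeB]
        rw [hx]
      rw [hstepA, hstepB]
      exact ih _ _ _ _ (pvRel_take vals order d pos c _ x xs ⟨hkeys, hc, hrem, hcur⟩ ht)

-- ===== VERDICT (by name: the statement is the Claim_ definition above) =====
theorem select_images_for_schedule_spec : Claim_equal_select_images_for_schedule := by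
  intro schedule buckets fallback_template strict _ _
  unfold Spec_select_images_for_schedule select_images_for_schedule select_images_for_schedule_alt
  exact pvFold_eq _ _ _ _ rfl schedule _ _ _ _
    ⟨rfl, Nat.zero_le _, fun k => by simp [pvRem, PySem.Dict.getD_empty], fun i hi => absurd hi (Nat.not_lt_zero i)⟩
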